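-- pv_equiv track=rewrite | github.com/songc/LeetCode-Pyhton | leetcode1418.py | displayTable
-- ===== SOURCE A (Python) =====
-- from typing import List
-- import collections
--
-- def displayTable(orders: List[List[str]]) -> List[List[str]]:
--     tables = dict()
--     foods = set()
--     for order in orders:
--         if order[1] not in tables:
--             tables[order[1]] = collections.defaultdict(int)
--         tables[order[1]][order[2]]+=1
--         foods.add(order[2])
--     res = []
--     orderFood = sorted(foods)
--     res.append(["Table"]+orderFood)
--     for key in sorted(tables.keys(),key=lambda x:int(x)):
--         tmp = [key]
--         for food in orderFood:
--             if food in tables[key]: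
--                 tmp.append(str(tables[key][food]))
--             else:
--                 tmp.append("0")
--         res.append(tmp)
--     return res
-- ===== SOURCE B (Python) =====
-- def displayTable(orders):
--     # Brute-force recount: no counting dict at all; each cell is recomputed by
--     # scanning the orders list directly.
--     foods = sorted({o[2] for o in orders})
--     seen = []
--     for o in orders:
--         if o[1] not in seen:
--             seen.append(o[1])
--     rows = [
--         [t] + [str(sum(1 for o in orders if o[1] == t and o[2] == f)) for f in foods]
--         for t in sorted(seen, key=int)
--     ]
--     return [["Table"] + foods] + rows
-- ===== Notes on version B (the rewrite author's own statement) =====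
-- stated objective: alternative
-- what changed: Drops A's nested table->defaultdict counting structure entirely: B collects the sorted food list and first-appearance table list, then recomputes every cell by a direct brute-force scan of orders (sum of matches), so no counter/dict is built or looked up at all.
import Mathlib
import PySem

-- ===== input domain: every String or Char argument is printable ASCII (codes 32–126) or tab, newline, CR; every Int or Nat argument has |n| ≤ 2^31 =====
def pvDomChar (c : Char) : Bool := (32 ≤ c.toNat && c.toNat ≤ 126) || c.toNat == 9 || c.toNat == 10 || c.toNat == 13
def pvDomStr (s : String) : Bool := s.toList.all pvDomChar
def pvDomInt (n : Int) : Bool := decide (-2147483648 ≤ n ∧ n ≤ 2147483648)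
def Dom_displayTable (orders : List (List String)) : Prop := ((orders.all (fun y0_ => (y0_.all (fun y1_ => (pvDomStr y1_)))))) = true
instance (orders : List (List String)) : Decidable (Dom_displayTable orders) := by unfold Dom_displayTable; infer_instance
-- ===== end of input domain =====

-- B drops A's nested counting dicts entirely and recomputes each cell by a direct scan of orders; objective: alternative.


-- ===== PORT A =====
-- Literal port of A. order[1] / order[2] are pyGetD with a default only reachable outside Pre_
-- (Python raises IndexError there); int(x) in the sort key is ofStr? with a default only
-- reachable outside Pre_ (ValueError there); tables[key] in the output loop is getD (the key is
-- always present there).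
def displayTable (orders : List (List String)) : List (List String) :=
  let st := orders.foldl (fun st order =>
      let tables := if st.1.contains (PySem.List.pyGetD order 1 "") then st.1
                    else st.1.insert (PySem.List.pyGetD order 1 "") PySem.Dict.empty
      (tables.insert (PySem.List.pyGetD order 1 "")
         ((tables.getD (PySem.List.pyGetD order 1 "") PySem.Dict.empty).modify
            (PySem.List.pyGetD order 2 "") 0 (· + 1)),
       PySem.Set.add st.2 (PySem.List.pyGetD order 2 "")))
    ((PySem.Dict.empty : PySem.Dict String (PySem.Dict String Int)),
     (PySem.Set.empty : PySem.Set String))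
  let orderFood := PySem.List.sorted st.2 (fun x => x) false
  let res : List (List String) := [["Table"] ++ orderFood]
  (PySem.List.sorted st.1.keys (fun x => (PySem.Int.ofStr? x).getD 0) false).foldl
    (fun res key =>
      res ++ [orderFood.foldl (fun tmp food =>
          if (st.1.getD key PySem.Dict.empty).contains food
          then tmp ++ [PySem.Int.toStr ((st.1.getD key PySem.Dict.empty).getD food 0)]
          else tmp ++ ["0"]) [key]]) res

-- ===== PORT B =====
-- Literal port of Source B: no counting structure; 'if o[1] not in seen: seen.append(o[1])' is
-- PySem.Set.add, and each cell's 'sum(1 for o in orders if …)' is a direct counting fold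
-- over orders.
def displayTable_alt (orders : List (List String)) : List (List String) :=
  let foods := PySem.List.sorted
    (PySem.Set.ofList (orders.map (fun o => PySem.List.pyGetD o 2 ""))) (fun x => x) false
  let seen := orders.foldl (fun seen o => PySem.Set.add seen (PySem.List.pyGetD o 1 ""))
    (PySem.Set.empty : PySem.Set String)
  let rows := (PySem.List.sorted seen (fun x => (PySem.Int.ofStr? x).getD 0) false).map
    (fun t => [t] ++ foods.map (fun f => PySem.Int.toStr
      (orders.foldl (fun c o =>
        if PySem.List.pyGetD o 1 "" == t && PySem.List.pyGetD o 2 "" == f then c + 1 else c)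
        (0 : Int))))
  [["Table"] ++ foods] ++ rows

-- ===== PRECONDITION & SPEC =====
-- A raises IndexError on an order with fewer than 3 entries and ValueError when a table id does
-- not parse as a Python int; Pre_ excludes exactly those inputs (B raises there too).
def Pre_displayTable (orders : List (List String)) : Prop :=
  ∀ o ∈ orders, 3 ≤ o.length ∧ (PySem.Int.ofStr? (PySem.List.pyGetD o 1 "")).isSome = true
instance (orders : List (List String)) : Decidable (Pre_displayTable orders) := by
  unfold Pre_displayTable; infer_instance
def pvWitness_displayTable : List (List String) :=
  [["breakfast", "3", "rice"], ["lunch", "1", "beef"], ["snack", "3", "beef"]]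
def Spec_displayTable (orders : List (List String)) (out : List (List String)) : Prop := out = displayTable_alt orders
instance (orders : List (List String)) (out : List (List String)) : Decidable (Spec_displayTable orders out) := by unfold Spec_displayTable; infer_instance

-- ===== CLAIM (what is proved, stated in full; the proofs are below) =====
def Claim_equal_displayTable : Prop := ∀ (orders : List (List String)), Dom_displayTable orders → Pre_displayTable orders → Spec_displayTable orders (displayTable orders)

-- ===== LEMMAS AND PROOFS =====

-- proof-only abbreviations (not used by the ports)
def pvKey (o : List String) : String × String :=
  (PySem.List.pyGetD o 1 "", PySem.List.pyGetD o 2 "")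

def pvStepT (d : PySem.Dict String (PySem.Dict String Int)) (k : String × String) :
    PySem.Dict String (PySem.Dict String Int) :=
  d.insert k.1 ((d.getD k.1 PySem.Dict.empty).modify k.2 0 (· + 1))

def pvStepC (c : PySem.Dict (String × String) Int) (k : String × String) :
    PySem.Dict (String × String) Int :=
  c.insert k (c.getD k 0 + 1)

-- A's conditional fresh insert followed by the counted update collapses to pvStepT
theorem pvStepT_collapse (d : PySem.Dict String (PySem.Dict String Int)) (t f : String) :
    (let tables := if d.contains t then d else d.insert t PySem.Dict.empty
     tables.insert t ((tables.getD t PySem.Dict.empty).modify f 0 (· + 1)))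
    = pvStepT d (t, f) := by
  by_cases h : d.contains t = true
  · simp [h, pvStepT]
  · simp only [pvStepT, eq_false_of_ne_true h, Bool.false_eq_true, if_false]
    rw [PySem.Dict.getD_insert_self, PySem.Dict.insert_insert_self,
        PySem.Dict.getD_of_not_contains d PySem.Dict.empty (eq_false_of_ne_true h)]

-- the nested-dict lookup agrees with the flat-counter lookup throughout the build
theorem pvLookup_inv (ks : List (String × String))
    (d : PySem.Dict String (PySem.Dict String Int)) (c : PySem.Dict (String × String) Int)
    (hinv : ∀ t f, ((d.get? t).bind (fun inn => inn.get? f)) = c.get? (t, f)) :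
    ∀ t f, (((ks.foldl pvStepT d).get? t).bind (fun inn => inn.get? f))
      = (ks.foldl pvStepC c).get? (t, f) := by
  induction ks generalizing d c with
  | nil => exact hinv
  | cons k ks ih =>
    simp only [List.foldl_cons]
    apply ih
    intro t f
    by_cases ht : t = k.1
    · subst ht
      rw [pvStepT, PySem.Dict.get?_insert_self, Option.bind_some]
      by_cases hf : f = k.2
      · subst hf
        have hk : (k.1, k.2) = k := rfl
        rw [pvStepC, hk, PySem.Dict.get?_insert_self]
        have hmod : ((d.getD k.1 PySem.Dict.empty).modify k.2 0 (· + 1)).get? k.2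
            = some ((d.getD k.1 PySem.Dict.empty).getD k.2 0 + 1) := by
          show ((d.getD k.1 PySem.Dict.empty).insert k.2 _).get? k.2 = _
          rw [PySem.Dict.get?_insert_self]
        rw [hmod]
        have h0 := hinv k.1 k.2
        cases hdk : d.get? k.1 with
        | none =>
          rw [hdk] at h0
          simp [PySem.Dict.getD_eq_get?_getD, hdk, PySem.Dict.get?_empty, ← h0]
        | some inn =>
          rw [hdk] at h0
          simp [PySem.Dict.getD_eq_get?_getD, hdk, ← h0]
      · have hfk : f ≠ k.2 := hf
        have hpair : (k.1, f) ≠ k := by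
          intro h; exact hfk (by rw [← h])
        rw [pvStepC, PySem.Dict.get?_insert_of_ne _ _ hpair]
        have hmod : ((d.getD k.1 PySem.Dict.empty).modify k.2 0 (· + 1)).get? f
            = (d.getD k.1 PySem.Dict.empty).get? f := by
          show ((d.getD k.1 PySem.Dict.empty).insert k.2 _).get? f = _
          rw [PySem.Dict.get?_insert_of_ne _ _ hf]
        rw [hmod, ← hinv k.1 f]
        cases hdk : d.get? k.1 with
        | none => simp [PySem.Dict.getD_eq_get?_getD, hdk, PySem.Dict.get?_empty]
        | some inn => simp [PySem.Dict.getD_eq_get?_getD, hdk]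
    · have hpair : (t, f) ≠ k := by
        intro h; exact ht (by rw [← h])
      rw [pvStepT, pvStepC, PySem.Dict.get?_insert_of_ne _ _ ht, PySem.Dict.get?_insert_of_ne _ _ hpair]
      exact hinv t f

-- ===== VERDICT (by name: the statement is the Claim_ definition above) =====
theorem displayTable_spec : Claim_equal_displayTable := by
  intro orders _hdom _hpre
  unfold Spec_displayTable displayTable displayTable_alt
  simp only []
  -- collapse A's table step and name the key of each order
  have hstep : (fun (st : PySem.Dict String (PySem.Dict String Int) × PySem.Set String) (order : List String) =>
        ((if st.1.contains (PySem.List.pyGetD order 1 "") then st.1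
          else st.1.insert (PySem.List.pyGetD order 1 "") PySem.Dict.empty).insert
           (PySem.List.pyGetD order 1 "")
           (((if st.1.contains (PySem.List.pyGetD order 1 "") then st.1
              else st.1.insert (PySem.List.pyGetD order 1 "") PySem.Dict.empty).getD
               (PySem.List.pyGetD order 1 "") PySem.Dict.empty).modify
             (PySem.List.pyGetD order 2 "") 0 (· + 1)),
         PySem.Set.add st.2 (PySem.List.pyGetD order 2 "")))
      = fun st order => (pvStepT st.1 (pvKey order),
          PySem.Set.add st.2 (PySem.List.pyGetD order 2 "")) := by
    funext st o
    refine congrArg₂ Prod.mk ?_ rfl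
    exact pvStepT_collapse st.1 (PySem.List.pyGetD o 1 "") (PySem.List.pyGetD o 2 "")
  rw [hstep, PySem.List.foldl_prod_mk
      (f := fun d order => pvStepT d (pvKey order))
      (g := fun s order => PySem.Set.add s (PySem.List.pyGetD order 2 ""))]
  simp only []
  have hfoldT : orders.foldl (fun tables order => pvStepT tables (pvKey order)) PySem.Dict.empty
      = (orders.map pvKey).foldl pvStepT PySem.Dict.empty :=
    (List.foldl_map (f := pvKey) (g := pvStepT) (l := orders) (init := PySem.Dict.empty)).symm
  rw [hfoldT]
  set ks := orders.map pvKey with hks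
  set tables := ks.foldl pvStepT PySem.Dict.empty with htables
  -- the central lookup bridge: nested lookup = Counter(ks) lookup
  have hlook : ∀ t f, ((tables.get? t).bind (fun inn => inn.get? f))
      = (PySem.Dict.counter ks).get? (t, f) := by
    intro t f
    rw [htables, ← PySem.Dict.foldl_insert_getD_add_one_eq_counter]
    exact pvLookup_inv ks PySem.Dict.empty PySem.Dict.empty
      (by intro t f; simp [PySem.Dict.get?_empty]) t f
  -- the food lists coincide
  have hfoods : orders.foldl (fun s order => PySem.Set.add s (PySem.List.pyGetD order 2 ""))
        (PySem.Set.empty : PySem.Set String)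
      = PySem.Set.ofList (orders.map (fun o => PySem.List.pyGetD o 2 "")) := by
    rw [PySem.Set.ofList_eq_foldl,
        List.foldl_map (f := fun o => PySem.List.pyGetD o 2 "") (g := PySem.Set.add)]
    rfl
  -- the table lists coincide: A's dict keys = B's seen list
  have htkeys : tables.keys
      = orders.foldl (fun seen o => PySem.Set.add seen (PySem.List.pyGetD o 1 ""))
          (PySem.Set.empty : PySem.Set String) := by
    rw [show tables = ks.foldl (fun d k => d.insert k.1
          ((d.getD k.1 PySem.Dict.empty).modify k.2 0 (· + 1))) PySem.Dict.empty from htables,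
        PySem.Dict.keys_foldl_insert_key]
    simp only [PySem.Dict.keys_empty, PySem.Set.update, hks, List.map_map]
    rw [List.foldl_map]
    rfl
  rw [hfoods, htkeys]
  set foods := PySem.List.sorted
    (PySem.Set.ofList (orders.map (fun o => PySem.List.pyGetD o 2 ""))) (fun x => x) false
    with hof
  -- A's outer append loop is a map over the sorted table keys
  rw [PySem.List.foldl_append_singleton_eq_map]
  congr 1
  apply List.map_congr_left
  intro t htmem
  have htk : t ∈ tables.keys := by
    rw [htkeys]; exact (PySem.List.mem_sorted _ _ _ _).mp htmem
  obtain ⟨inn, hinn⟩ : ∃ inn, tables.get? t = some inn := by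
    cases h : tables.get? t with
    | none =>
      rw [PySem.Dict.get?_eq_none_iff_not_mem_keys] at h
      exact absurd htk h
    | some inn => exact ⟨inn, rfl⟩
  -- A's inner append loop is a map over the sorted foods
  have hinner : (fun (tmp : List String) (food : String) =>
        if (tables.getD t PySem.Dict.empty).contains food
        then tmp ++ [PySem.Int.toStr ((tables.getD t PySem.Dict.empty).getD food 0)]
        else tmp ++ ["0"])
      = fun tmp food => tmp ++ [if (tables.getD t PySem.Dict.empty).contains food
        then PySem.Int.toStr ((tables.getD t PySem.Dict.empty).getD food 0) else "0"] := by
    funext tmp food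
    by_cases h : (tables.getD t PySem.Dict.empty).contains food <;> simp [h]
  rw [hinner, PySem.List.foldl_append_singleton_eq_map]
  show [t] ++ _ = [t] ++ _
  congr 1
  apply List.map_congr_left
  intro f _
  -- B's cell: the counting fold over orders is the count of (t, f) in ks
  have hcell : orders.foldl (fun c o =>
        if PySem.List.pyGetD o 1 "" == t && PySem.List.pyGetD o 2 "" == f then c + 1 else c)
        (0 : Int) = (ks.count (t, f) : Int) := by
    rw [PySem.List.foldl_if_add_one, hks, zero_add]
    congr 1
    rw [List.count_eq_countP, List.countP_map]
    rfl
  rw [hcell]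
  -- A's cell via the lookup bridge
  have hl := hlook t f
  rw [hinn, Option.bind_some] at hl
  rw [PySem.Dict.getD_of_get?_eq_some _ _ hinn, PySem.Dict.contains_eq_isSome_get?,
      PySem.Dict.getD_eq_get?_getD, hl]
  by_cases hmem : (t, f) ∈ ks
  · have hsome : ((PySem.Dict.counter ks).get? (t, f)).isSome = true := by
      rw [← PySem.Dict.contains_eq_isSome_get?, PySem.Dict.contains_counter]
      exact List.elem_eq_true_of_mem hmem
    rw [if_pos hsome]
    congr 1
    rw [← PySem.Dict.getD_eq_get?_getD, PySem.Dict.getD_counter]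
  · have hnone : (PySem.Dict.counter ks).get? (t, f) = none := by
      rw [PySem.Dict.get?_eq_none_iff_not_mem_keys, PySem.Dict.keys_counter]
      intro h
      exact hmem ((PySem.Set.mem_ofList _ _).mp h)
    rw [hnone]
    simp [List.count_eq_zero.mpr hmem]
    rfl
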